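/- GENERATED by mk_final_copies.py from the proof of the farm's unit `start_decoder.C11a` (farm:start_decoder.C11a.1: Proof.lean) as the
   re-elaboration sweep compiled it — do not edit. -/
import Asan.CheckWalk
import Vorbis.Spec.Reader
import Vorbis.Spec.StartDecoderC4
import Vorbis.Spec.Units.start_decoder_C11a
import Vorbis.Spec.Worked.start_decoder_C11a_Lemmas

open X86 X86.User Asan Vorbis Vorbis.Spec Vorbis.Spec.StartDecoder

set_option maxRecDepth 4000
set_option maxHeartbeats 4000000

namespace Vorbis.Spec.start_decoder_C11a

/-- **Segment C11a of `start_decoder`** (0x114bad … 0x114bdf, stb_vorbis_fixed.c:3878–3879) from `InC11` for given ghosts: the three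
walks of Lemmas.lean — `legA` (`cut149` → `cut150`, the return of the first `get_bits(f, 32)`), `legB` (`cut150` → `cut151`, the
return of `float32_unpack`), `legC` (`cut151` → `cut152`: the checked store `c->minimum_value` and the second `get_bits(f, 32)`) —
composed by `ReachVia.trans`. Each leg carries `In11P` (`carryA`) and, from `cut150` on, `r15 = f`. -/
theorem segC11a_walk {Lay : Layout} (hLay : Lay.hi = 0x1000000) {μ : Microarch} (hμ : UserX.MicroOK μ) {u₀ : State}
    (hcode : HasCodeNat Lay u₀ Vorbis.L.start_decoder.entry Vorbis.Code.code_start_decoder.nat Vorbis.L.start_decoder.size)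
    (hgb : ∀ (others : List Obj) (frames : List (Nat × FrameLayout)) (Blk : Block → Prop) (len : Nat), Calls Lay μ Vorbis.WayInv (Vorbis.conv u₀) Vorbis.L.get_bits.entry (Vorbis.Spec.get_bits.spec others frames Blk len))
    (hfu : ∀ (others : List Obj) (frames : List (Nat × FrameLayout)), Calls Lay μ Vorbis.WayInv (Vorbis.conv u₀) Vorbis.L.float32_unpack.entry (Vorbis.Spec.float32_unpack.spec others frames))
    (hst4 : Asan.SmallCheck Lay μ Vorbis.WayInv (Vorbis.CodeOK u₀) [.rax, .rcx, .rdx] 4 Vorbis.L.__asan_store4_noabort.entry)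
    {g : Ghost} {i : Nat} {A2 A3 Ai : Arena} {A : Arena × List Obj} {v : State}
    (hat : InC11 u₀ g i A2 A3 Ai A v) :
    ReachVia Lay μ WayInv v (fun w => At11R u₀ g i w) := by
  -- 0x114bad (`cut149`): `InC11` is `In11P` at its own program counter
  have h0 : In11P u₀ g i A2 A3 Ai A Vorbis.L.start_decoder.cut149 v := In11P.of_inC11 hat
  -- 0x114bbf (`cut150`): the return of `get_bits(f, 32)`, line 3878
  refine (legA hLay hμ hcode hgb h0).trans ?_
  intro v1 h1
  obtain ⟨hP1, hr1⟩ := h1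
  -- 0x114bc6 (`cut151`): the return of `float32_unpack`, line 3878
  refine (legB hLay hμ hcode hfu hP1 hr1).trans ?_
  intro v2 h2
  obtain ⟨hP2, hr2⟩ := h2
  -- 0x114be4 (`cut152`): the return of the second `get_bits(f, 32)`, line 3879
  refine (legC hLay hμ hcode hgb hst4 hP2 hr2).trans ?_
  intro v3 h3
  obtain ⟨hP3, hr3⟩ := h3
  exact ReachVia.done ⟨A, A2, A3, Ai, hP3, hr3⟩

end Vorbis.Spec.start_decoder_C11a

/-- The unit `start_decoder.C11a`: `segC11a_walk` at every entry state. -/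
theorem Vorbis.Spec.Worked.start_decoder_C11a_ok : Vorbis.Spec.start_decoder_C11a.Statement := by
  intro Lay hLay μ hμ u₀ hcode hgb hfu hst4 g i v hat
  obtain ⟨A, A2, A3, Ai, h⟩ := hat
  exact Vorbis.Spec.start_decoder_C11a.segC11a_walk hLay hμ hcode hgb hfu hst4 h
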